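-- pv_equiv track=rewrite | github.com/shujatoor/blockworldproblem | blockworldAgent.py | block_moves
-- ===== SOURCE A (Python) =====
-- import copy
--
-- def calc_state_heuristic(state,goal):
--
--     h_counter = 0
--     heu = 0
--     unmatch = 0
--
--
--     for lst_state in state:
--         for lst_goal in goal:
--
--             match_index_of_state = [i for i, el in enumerate(lst_state) if el in lst_goal]
--
--             if lst_state!= lst_goal[:len(match_index_of_state)]:
--
--                 unmatch+=1
--
--             elif lst_state == lst_goal[:len(match_index_of_state)]:
--
--                 unmatch-=1
--
--         if unmatch == len(goal):
--
--             h_counter = -1*sum(range(len(lst_state)))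
--             heu  = heu +  h_counter
--             unmatch = 0
--
--         elif unmatch < len(goal):
--
--             h_counter = sum(range(len(lst_state)))
--             heu  = heu +  h_counter
--             unmatch = 0
--
--
--
--     return heu
--
-- def block_moves(curr_state,goal):
--
--     len_curr_state = len(curr_state)  #total list(s) of blocks
--     temp_heuristic_values = []
--     temp =  []
--     temp_state = []
--
--
--     for lst in curr_state:
--
--         for i in range(len_curr_state):
--
--             lst_index  = curr_state.index(lst)
--
--             if i == lst_index:
--
--                 len_lst = len(lst)
--                 temp = copy.deepcopy(curr_state)
--                 temp[lst_index].pop() #pick the block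
--                 place = lst[len_lst-1]
--                 temp.append([place]) #place the block on table
--                 temp = [ele for ele in temp if ele != []]
--                 temp_state.append(temp)
--                 temp_heuristic = calc_state_heuristic(temp,goal)
--                 temp_heuristic_values.append(temp_heuristic)
--
--             else:
--
--                 len_lst = len(lst)
--                 temp = copy.deepcopy(curr_state)
--                 temp[lst_index].pop() #pick the block
--                 place = lst[len_lst-1]
--                 temp[i].append(place) #place the block on another block
--                 temp = [ele for ele in temp if ele != []]
--                 temp_state.append(temp)
--
--                 temp_heuristic = calc_state_heuristic(temp,goal)
--                 temp_heuristic_values.append(temp_heuristic)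
--
--
--     return temp_state, temp_heuristic_values
-- ===== SOURCE B (Python) =====
-- # Incremental heuristic: precompute each stack's contribution once, then update
-- # only the two stacks a move changes, instead of rescoring the whole state per move.
-- def _contrib(stack, goal):
--     # per-stack heuristic contribution: +/- len*(len-1)//2, negative iff the
--     # stack fails the prefix test against every goal stack
--     t = len(stack) * (len(stack) - 1) // 2
--     if all(stack != g[:sum(1 for el in stack if el in g)] for g in goal):
--         return -t
--     return t
--
-- def block_moves(curr_state, goal):
--     n = len(curr_state)
--     cs = [_contrib(s, goal) for s in curr_state]
--     total = sum(cs)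
--     states = []
--     heus = []
--     for j in range(n):
--         src = curr_state[j]
--         place = src[-1]
--         popped = src[:-1]
--         c_popped = _contrib(popped, goal)
--         for i in range(n):
--             new = curr_state.copy()
--             new[j] = popped
--             if i == j:
--                 new.append([place])
--                 h = total - cs[j] + c_popped
--             else:
--                 dest = curr_state[i] + [place]
--                 new[i] = dest
--                 h = total - cs[j] - cs[i] + c_popped + _contrib(dest, goal)
--             states.append([s for s in new if s])
--             heus.append(h)
--     return states, heus
-- ===== Notes on version B (the rewrite author's own statement) =====
-- stated objective: faster
-- what changed: B precomputes each stack's heuristic contribution once and scores every successor by adjusting only the two stacks the move changes (the heuristic decomposes as a sum of per-stack terms), indexing stacks by position instead of list.index, instead of A's full-state heuristic recomputation for each of the n^2 moves.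
-- intended difference: On states with duplicate stacks A's list.index always locates the first duplicate, so A pops the first duplicate even when iterating over a later one and emits repeated/misordered successors; B moves each stack by its own position, the intended one-block-move semantics. — e.g. on block_moves([[1], [1]], []): A returns ([[[1], [1]], [[1, 1]], [[1], [1]], [[1, 1]]], [0, -1, 0, -1]), B returns ([[[1], [1]], [[1, 1]], [[1, 1]], [[1], [1]]], [0, -1, -1, 0])
import Mathlib
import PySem

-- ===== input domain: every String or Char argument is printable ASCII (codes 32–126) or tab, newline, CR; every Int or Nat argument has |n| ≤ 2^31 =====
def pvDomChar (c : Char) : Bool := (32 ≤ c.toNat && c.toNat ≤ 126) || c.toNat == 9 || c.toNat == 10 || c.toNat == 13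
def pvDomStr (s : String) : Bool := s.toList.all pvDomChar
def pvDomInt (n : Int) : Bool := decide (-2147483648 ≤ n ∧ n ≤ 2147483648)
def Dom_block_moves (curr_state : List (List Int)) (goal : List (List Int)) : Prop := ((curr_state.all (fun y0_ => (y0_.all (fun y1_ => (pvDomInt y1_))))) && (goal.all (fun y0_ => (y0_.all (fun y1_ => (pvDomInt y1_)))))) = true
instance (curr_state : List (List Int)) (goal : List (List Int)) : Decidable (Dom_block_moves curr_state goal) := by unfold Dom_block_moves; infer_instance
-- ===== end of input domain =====

-- B precomputes per-stack heuristic contributions and updates only the two stacks a move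
-- changes, avoiding A's full-state rescoring per move (objective: faster).

-- ===== PORT A =====
def calc_state_heuristic (state : List (List Int)) (goal : List (List Int)) : Int :=
  (state.foldl
    (fun (acc : Int × Int) lst_state =>
      let unmatch := goal.foldl
        (fun u lst_goal =>
          let match_index_of_state :=
            ((PySem.List.enumerate lst_state).filter (fun p => decide (p.2 ∈ lst_goal))).map (fun p => p.1)
          if lst_state ≠ PySem.List.slice lst_goal none (some (match_index_of_state.length : Int)) then u + 1
          else u - 1)
        acc.2
      if unmatch = (goal.length : Int) then
        (acc.1 + (-1) * (PySem.List.pyRange 0 (lst_state.length : Int) 1).sum, 0)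
      else if unmatch < (goal.length : Int) then
        (acc.1 + (PySem.List.pyRange 0 (lst_state.length : Int) 1).sum, 0)
      else (acc.1, unmatch))
    ((0 : Int), (0 : Int))).1

def block_moves (curr_state : List (List Int)) (goal : List (List Int)) : List (List (List Int)) × List Int :=
  let len_curr_state := curr_state.length
  curr_state.foldl
    (fun (acc : List (List (List Int)) × List Int) lst =>
      (List.range len_curr_state).foldl
        (fun acc i =>
          let lst_index := (PySem.List.index? curr_state lst).getD 0
          if i = lst_index then
            let len_lst := lst.length
            -- temp[lst_index].pop(): list.pop() on a nonempty list drops the last element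
            -- (exact there; Pre_ excludes empty stacks, where Python raises IndexError)
            let temp := curr_state.set lst_index (curr_state.getD lst_index []).dropLast
            let place := (PySem.List.pyGet? lst ((len_lst : Int) - 1)).getD 0
            let temp := temp ++ [[place]]
            let temp := temp.filter (fun ele => decide (ele ≠ []))
            (acc.1 ++ [temp], acc.2 ++ [calc_state_heuristic temp goal])
          else
            let len_lst := lst.length
            let temp := curr_state.set lst_index (curr_state.getD lst_index []).dropLast
            let place := (PySem.List.pyGet? lst ((len_lst : Int) - 1)).getD 0
            let temp := temp.set i (temp.getD i [] ++ [place])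
            let temp := temp.filter (fun ele => decide (ele ≠ []))
            (acc.1 ++ [temp], acc.2 ++ [calc_state_heuristic temp goal]))
        acc)
    ([], [])

-- ===== PORT B =====
def pyContrib (stack : List Int) (goal : List (List Int)) : Int :=
  let t := PySem.Int.floordiv ((stack.length : Int) * ((stack.length : Int) - 1)) 2
  -- sum(1 for el in stack if el in g) is the count of elements of stack lying in g
  if goal.all (fun g => decide (stack ≠ PySem.List.slice g none (some ((stack.countP (fun el => decide (el ∈ g))) : Int)))) then -t else t

def block_moves_alt (curr_state : List (List Int)) (goal : List (List Int)) : List (List (List Int)) × List Int :=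
  let n := curr_state.length
  let cs := curr_state.map (fun s => pyContrib s goal)
  let total := cs.sum
  (List.range n).foldl
    (fun (acc : List (List (List Int)) × List Int) j =>
      let src := curr_state.getD j []
      let place := (PySem.List.pyGet? src (-1)).getD 0
      let popped := PySem.List.slice src none (some (-1))
      let c_popped := pyContrib popped goal
      (List.range n).foldl
        (fun acc i =>
          let new := curr_state.set j popped
          if i = j then
            let new := new ++ [[place]]
            let h := total - cs.getD j 0 + c_popped
            (acc.1 ++ [new.filter (fun s => decide (s ≠ []))], acc.2 ++ [h])
          else
            let dest := curr_state.getD i [] ++ [place]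
            let new := new.set i dest
            let h := total - cs.getD j 0 - cs.getD i 0 + c_popped + pyContrib dest goal
            (acc.1 ++ [new.filter (fun s => decide (s ≠ []))], acc.2 ++ [h]))
        acc)
    ([], [])

-- ===== PRECONDITION & SPEC =====
-- Pre_ excludes exactly the states containing an empty stack: there A raises IndexError
-- (list.pop() / lst[-1] on an empty list), and B raises IndexError too (src[-1]).
def Pre_block_moves (curr_state : List (List Int)) (goal : List (List Int)) : Prop :=
  ∀ s ∈ curr_state, s ≠ []
instance (curr_state : List (List Int)) (goal : List (List Int)) : Decidable (Pre_block_moves curr_state goal) := by unfold Pre_block_moves; infer_instance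

def pvWitness_block_moves : List (List Int) × List (List Int) := ([[1], [2, 3]], [[1, 2, 3]])

-- On states with duplicate stacks A's list.index always finds the FIRST duplicate, so A pops the
-- first duplicate even when iterating over a later one, producing repeated/misordered successors;
-- B moves each stack by its own position, the intended one-block-move semantics.
def D_block_moves (curr_state : List (List Int)) (goal : List (List Int)) : Prop :=
  ¬ curr_state.Nodup
instance (curr_state : List (List Int)) (goal : List (List Int)) : Decidable (D_block_moves curr_state goal) := by unfold D_block_moves; infer_instance

def Spec_block_moves (curr_state : List (List Int)) (goal : List (List Int)) (out : List (List (List Int)) × List Int) : Prop := ¬ D_block_moves curr_state goal → out = block_moves_alt curr_state goal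
instance (curr_state : List (List Int)) (goal : List (List Int)) (out : List (List (List Int)) × List Int) : Decidable (Spec_block_moves curr_state goal out) := by unfold Spec_block_moves; infer_instance

def pvDiffWitness_block_moves : List (List Int) × List (List Int) := ([[1], [1]], [])

def pvDiffWitnessOut_block_moves : (List (List (List Int)) × List Int) × (List (List (List Int)) × List Int) :=
  (([[[1], [1]], [[1, 1]], [[1], [1]], [[1, 1]]], [0, -1, 0, -1]),
   ([[[1], [1]], [[1, 1]], [[1, 1]], [[1], [1]]], [0, -1, -1, 0]))

-- ===== CLAIM (what is proved, stated in full; the proofs are below) =====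
def Claim_unchanged_block_moves : Prop := ∀ (curr_state : List (List Int)) (goal : List (List Int)), Dom_block_moves curr_state goal → Pre_block_moves curr_state goal → Spec_block_moves curr_state goal (block_moves curr_state goal)
def Claim_changed_block_moves : Prop := Dom_block_moves (pvDiffWitness_block_moves.1) (pvDiffWitness_block_moves.2) ∧ Pre_block_moves (pvDiffWitness_block_moves.1) (pvDiffWitness_block_moves.2) ∧ D_block_moves (pvDiffWitness_block_moves.1) (pvDiffWitness_block_moves.2) ∧ block_moves (pvDiffWitness_block_moves.1) (pvDiffWitness_block_moves.2) = pvDiffWitnessOut_block_moves.1 ∧ block_moves_alt (pvDiffWitness_block_moves.1) (pvDiffWitness_block_moves.2) = pvDiffWitnessOut_block_moves.2 ∧ pvDiffWitnessOut_block_moves.1 ≠ pvDiffWitnessOut_block_moves.2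

-- ===== LEMMAS AND PROOFS =====

-- generic: a fold adding +/-1 per element is the sum of +/-1 terms
theorem pv_foldl_pm {α : Type} (p : α → Prop) [DecidablePred p] (l : List α) :
    ∀ u : Int, l.foldl (fun u g => if p g then u + 1 else u - 1) u
      = u + (l.map (fun g => if p g then (1 : Int) else -1)).sum := by
  induction l with
  | nil => intro u; simp
  | cons x xs ih => intro u; simp only [List.foldl_cons, List.map_cons, List.sum_cons, ih]; split <;> ring

theorem pv_sum_pm_le {α : Type} (p : α → Prop) [DecidablePred p] (l : List α) :
    (l.map (fun g => if p g then (1 : Int) else -1)).sum ≤ (l.length : Int) := by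
  induction l with
  | nil => simp
  | cons x xs ih => simp only [List.map_cons, List.sum_cons, List.length_cons]; split <;> push_cast <;> omega

theorem pv_sum_pm_eq_iff {α : Type} (p : α → Prop) [DecidablePred p] (l : List α) :
    (l.map (fun g => if p g then (1 : Int) else -1)).sum = (l.length : Int) ↔ ∀ g ∈ l, p g := by
  induction l with
  | nil => simp
  | cons x xs ih =>
    simp only [List.map_cons, List.sum_cons, List.length_cons, List.mem_cons]
    have hle := pv_sum_pm_le p xs
    constructor
    · intro h
      by_cases hx : p x
      · simp only [if_pos hx] at h
        have : (xs.map (fun g => if p g then (1 : Int) else -1)).sum = (xs.length : Int) := by push_cast at h ⊢; omega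
        exact fun g hg => hg.elim (fun e => e ▸ hx) (fun hm => (ih.mp this) g hm)
      · simp only [if_neg hx] at h; push_cast at h; omega
    · intro h
      have hx : p x := h x (Or.inl rfl)
      have hxs : (xs.map (fun g => if p g then (1 : Int) else -1)).sum = (xs.length : Int) :=
        ih.mpr (fun g hg => h g (Or.inr hg))
      simp [if_pos hx, hxs]; push_cast; ring

-- the length of A's match-index comprehension is a countP
theorem pv_filt_enum_len (q : Int → Bool) (s : List Int) :
    ∀ k : Int, (((PySem.List.enumerate s k).filter (fun p => q p.2)).map (fun p => p.1)).length
      = s.countP q := by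
  induction s with
  | nil => intro k; simp [PySem.List.enumerate]
  | cons x xs ih =>
    intro k
    rw [PySem.List.enumerate_cons]
    by_cases hx : q x = true
    · simp [hx, ih]
    · simp [hx, ih (k + 1)]

theorem pv_gauss_key (n : Nat) : 2 * (List.range n).sum + n = n * n := by
  induction n with
  | zero => simp
  | succ m ih =>
    rw [List.range_succ, List.sum_append, Nat.mul_succ, Nat.succ_mul]
    simp only [List.sum_cons, List.sum_nil, Nat.add_zero]
    linarith

theorem pv_list_gauss (n : Nat) : (List.range n).sum = (n * n - n) / 2 := by
  have h := pv_gauss_key n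
  generalize hgen : n * n = p at h ⊢
  omega

theorem pv_pyRange_gauss (n : Nat) :
    (PySem.List.pyRange 0 (n : Int) 1).sum = PySem.Int.floordiv ((n : Int) * ((n : Int) - 1)) 2 := by
  have hcast : ((n : Int) * ((n : Int) - 1)) = ((n * n - n : Nat) : Int) := by
    cases n with
    | zero => simp
    | succ m =>
      rw [Nat.mul_succ, Nat.add_sub_cancel]
      push_cast [Nat.succ_sub_one]
      ring
  rw [hcast, show ((2 : Int)) = ((2 : Nat) : Int) from rfl, PySem.Int.floordiv_natCast,
    PySem.List.pyRange_zero_natCast]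
  rw [show (List.map (fun k : Nat => (k : Int)) (List.range n)).sum = ((List.range n).sum : Int) from
    (Nat.cast_list_sum _).symm]
  rw [pv_list_gauss]

def pvStepA (goal : List (List Int)) : (Int × Int) → List Int → (Int × Int) :=
  fun acc lst_state =>
    let unmatch := goal.foldl
      (fun u lst_goal =>
        let match_index_of_state :=
          ((PySem.List.enumerate lst_state).filter (fun p => decide (p.2 ∈ lst_goal))).map (fun p => p.1)
        if lst_state ≠ PySem.List.slice lst_goal none (some (match_index_of_state.length : Int)) then u + 1
        else u - 1)
      acc.2
    if unmatch = (goal.length : Int) then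
      (acc.1 + (-1) * (PySem.List.pyRange 0 (lst_state.length : Int) 1).sum, 0)
    else if unmatch < (goal.length : Int) then
      (acc.1 + (PySem.List.pyRange 0 (lst_state.length : Int) 1).sum, 0)
    else (acc.1, unmatch)

theorem pv_stepA_eq (goal : List (List Int)) (s : List Int) (h0 : Int) :
    pvStepA goal (h0, 0) s = (h0 + pyContrib s goal, (0 : Int)) := by
  unfold pvStepA
  have hlen : ∀ lst_goal : List Int,
      (((PySem.List.enumerate s 0).filter (fun p => decide (p.2 ∈ lst_goal))).map (fun p => p.1)).length
        = s.countP (fun el => decide (el ∈ lst_goal)) :=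
    fun g => pv_filt_enum_len (fun el => decide (el ∈ g)) s 0
  dsimp only
  simp only [hlen]
  rw [pv_foldl_pm (fun lst_goal : List Int =>
    s ≠ PySem.List.slice lst_goal none (some ((s.countP (fun el => decide (el ∈ lst_goal)) : Nat) : Int))) goal 0]
  have hle := pv_sum_pm_le (fun lst_goal : List Int =>
    s ≠ PySem.List.slice lst_goal none (some ((s.countP (fun el => decide (el ∈ lst_goal)) : Nat) : Int))) goal
  have hiff := pv_sum_pm_eq_iff (fun lst_goal : List Int =>
    s ≠ PySem.List.slice lst_goal none (some ((s.countP (fun el => decide (el ∈ lst_goal)) : Nat) : Int))) goal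
  simp only [zero_add]
  by_cases hall : ∀ g ∈ goal, s ≠ PySem.List.slice g none (some ((s.countP (fun el => decide (el ∈ g)) : Nat) : Int))
  · rw [if_pos (hiff.mpr hall)]
    have hallb : (goal.all (fun g => decide (s ≠ PySem.List.slice g none (some ((s.countP (fun el => decide (el ∈ g)) : Nat) : Int))))) = true := by
      rw [List.all_eq_true]; intro g hg; simpa using hall g hg
    have hc : pyContrib s goal
        = -(PySem.Int.floordiv ((s.length : Int) * ((s.length : Int) - 1)) 2) := by
      unfold pyContrib
      rw [if_pos hallb]
    rw [hc, pv_pyRange_gauss]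
    exact Prod.ext (by ring) rfl
  · have hne : ¬ ((goal.map (fun g => if s ≠ PySem.List.slice g none (some ((s.countP (fun el => decide (el ∈ g)) : Nat) : Int)) then (1:Int) else -1)).sum = (goal.length : Int)) := fun h => hall (hiff.mp h)
    rw [if_neg hne, if_pos (lt_of_le_of_ne hle hne)]
    have hallb : ¬ ((goal.all (fun g => decide (s ≠ PySem.List.slice g none (some ((s.countP (fun el => decide (el ∈ g)) : Nat) : Int))))) = true) := by
      rw [List.all_eq_true]
      intro hAll
      exact hall (fun g hg => by simpa using hAll g hg)
    have hc : pyContrib s goal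
        = PySem.Int.floordiv ((s.length : Int) * ((s.length : Int) - 1)) 2 := by
      unfold pyContrib
      rw [if_neg hallb]
    rw [hc, pv_pyRange_gauss]

theorem pv_foldA (goal : List (List Int)) :
    ∀ (st : List (List Int)) (h0 : Int),
      st.foldl (pvStepA goal) (h0, (0 : Int))
        = (h0 + (st.map (fun s => pyContrib s goal)).sum, 0) := by
  intro st
  induction st with
  | nil => intro h0; simp
  | cons s rest ih =>
    intro h0
    rw [List.foldl_cons, pv_stepA_eq, ih]
    simp only [List.map_cons, List.sum_cons]
    exact Prod.ext (by ring) rfl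

theorem pv_calc_sum (goal : List (List Int)) (state : List (List Int)) :
    calc_state_heuristic state goal = (state.map (fun s => pyContrib s goal)).sum := by
  unfold calc_state_heuristic
  change (state.foldl (pvStepA goal) ((0 : Int), (0 : Int))).1 = _
  rw [pv_foldA]
  simp

theorem pv_contrib_nil (goal : List (List Int)) : pyContrib [] goal = 0 := by
  unfold pyContrib
  have h1 : ((([] : List Int)).length : Int) * (((([] : List Int)).length : Int) - 1) = 0 := by simp
  have h2 : PySem.Int.floordiv 0 2 = 0 := by decide
  rw [h1, h2]; split <;> simp

theorem pv_contrib_single (x : Int) (goal : List (List Int)) : pyContrib [x] goal = 0 := by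
  unfold pyContrib
  have h1 : ((([x] : List Int)).length : Int) * (((([x] : List Int)).length : Int) - 1) = 0 := by simp
  have h2 : PySem.Int.floordiv 0 2 = 0 := by decide
  rw [h1, h2]; split <;> simp

theorem pv_sum_filter (f : List Int → Int) (p : List Int → Bool)
    (hf : ∀ x, p x = false → f x = 0) (l : List (List Int)) :
    ((l.filter p).map f).sum = (l.map f).sum := by
  induction l with
  | nil => simp
  | cons x xs ih =>
    cases hp : p x with
    | true => simp [hp, ih]
    | false => simp [hp, ih, hf x hp]

theorem pv_filter_ne_arg (goal : List (List Int)) :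
    ∀ x : List Int, (decide (x ≠ []) : Bool) = false → pyContrib x goal = 0 := by
  intro x hx
  have : x = [] := by simpa using hx
  subst this
  exact pv_contrib_nil goal

theorem pv_sum_map_set (l : List (List Int)) (f : List Int → Int) :
    ∀ (j : Nat) (x : List Int), j < l.length →
      ((l.set j x).map f).sum = (l.map f).sum - f (l.getD j []) + f x := by
  induction l with
  | nil => intro j x h; simp at h
  | cons a as ih =>
    intro j x h
    cases j with
    | zero => simp [List.set_cons_zero]; ring
    | succ k =>
      have hk : k < as.length := by simpa using h
      simp only [List.set_cons_succ, List.map_cons, List.sum_cons, ih k x hk, List.getD_cons_succ]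
      ring

theorem pv_map_getD_range (l : List (List Int)) :
    (List.range l.length).map (fun j => l.getD j []) = l := by
  apply List.ext_getElem
  · simp
  · intro i h1 h2
    simp [List.getD_eq_getElem?_getD, List.getElem?_eq_getElem h2]

theorem pv_foldl_over_self {γ : Type} (l : List (List Int)) (body : γ → List Int → γ) (init : γ) :
    l.foldl body init = (List.range l.length).foldl (fun acc j => body acc (l.getD j [])) init := by
  conv_lhs => rw [← pv_map_getD_range l]
  rw [List.foldl_map]

theorem pv_index_getD (curr : List (List Int)) (hn : curr.Nodup) (j : Nat) (hj : j < curr.length) :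
    (PySem.List.index? curr (curr.getD j [])).getD 0 = j := by
  rw [List.getD_eq_getElem?_getD, List.getElem?_eq_getElem hj]
  have h : PySem.List.index? curr curr[j] = some j := by
    rw [PySem.List.index?_eq_idxOf?, List.idxOf?_eq_some_iff]
    exact ⟨hj, rfl, fun k hk he =>
      absurd ((List.Nodup.getElem_inj_iff hn).mp he) (Nat.ne_of_lt hk)⟩
  simp only [Option.getD_some]
  rw [h]
  rfl

theorem pv_foldl_pair {α β γ : Type} (l : List γ) (f : γ → List α) (g : γ → List β) :
    ∀ (a : List α × List β),
      l.foldl (fun acc x => (acc.1 ++ f x, acc.2 ++ g x)) a = (a.1 ++ l.flatMap f, a.2 ++ l.flatMap g) := by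
  induction l with
  | nil => intro a; simp
  | cons x xs ih => intro a; simp [List.foldl_cons, ih]

theorem pv_foldl_pair_sing {α β γ : Type} (l : List γ) (f : γ → α) (g : γ → β) :
    ∀ (a : List α × List β),
      l.foldl (fun acc x => (acc.1 ++ [f x], acc.2 ++ [g x])) a = (a.1 ++ l.map f, a.2 ++ l.map g) := by
  induction l with
  | nil => intro a; simp
  | cons x xs ih => intro a; simp [List.foldl_cons, ih]

theorem pv_place_eq (s : List Int) :
    PySem.List.pyGet? s ((s.length : Int) - 1) = s.getLast? := by
  cases s with
  | nil => simpa using PySem.List.pyGet?_neg_one ([] : List Int)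
  | cons a l =>
    have h : ((a :: l).length : Int) - 1 = ((l.length : Nat) : Int) := by simp
    rw [h, PySem.List.pyGet?_natCast, List.getLast?_eq_getElem?]
    simp

-- the per-move state both ports build (A's form, with the stack index made explicit)
def pvSA (curr : List (List Int)) (j i : Nat) : List (List Int) :=
  let temp := curr.set j (curr.getD j []).dropLast
  let place := (PySem.List.pyGet? (curr.getD j []) (((curr.getD j []).length : Int) - 1)).getD 0
  if i = j then (temp ++ [[place]]).filter (fun ele => decide (ele ≠ []))
  else (temp.set i (temp.getD i [] ++ [place])).filter (fun ele => decide (ele ≠ []))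

def pvHA (curr goal : List (List Int)) (j i : Nat) : Int :=
  calc_state_heuristic (pvSA curr j i) goal

def pvHB (curr goal : List (List Int)) (j i : Nat) : Int :=
  let cs := curr.map (fun s => pyContrib s goal)
  let total := cs.sum
  let src := curr.getD j []
  let popped := PySem.List.slice src none (some (-1))
  let c_popped := pyContrib popped goal
  let place := (PySem.List.pyGet? src (-1)).getD 0
  if i = j then total - cs.getD j 0 + c_popped
  else total - cs.getD j 0 - cs.getD i 0 + c_popped + pyContrib (curr.getD i [] ++ [place]) goal

theorem pv_A_eq (curr goal : List (List Int)) (hn : curr.Nodup) :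
    block_moves curr goal
      = ((List.range curr.length).flatMap (fun j => (List.range curr.length).map (fun i => pvSA curr j i)),
         (List.range curr.length).flatMap (fun j => (List.range curr.length).map (fun i => pvHA curr goal j i))) := by
  simp only [block_moves]
  rw [pv_foldl_over_self]
  rw [PySem.List.foldl_congr_mem (List.range curr.length) _
    (fun acc j => (acc.1 ++ (List.range curr.length).map (fun i => pvSA curr j i),
                   acc.2 ++ (List.range curr.length).map (fun i => pvHA curr goal j i))) ([], [])
    (by
      intro acc j hj
      have hjlt : j < curr.length := List.mem_range.mp hj
      have hidx := pv_index_getD curr hn j hjlt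
      dsimp only
      simp only [hidx]
      rw [PySem.List.foldl_congr_mem (List.range curr.length) _
        (fun acc2 i => (acc2.1 ++ [pvSA curr j i], acc2.2 ++ [pvHA curr goal j i])) acc
        (by
          intro acc2 i hi
          dsimp only
          by_cases hij : i = j
          · rw [if_pos hij]
            simp only [pvSA, pvHA]
            rw [if_pos hij]
          · rw [if_neg hij]
            simp only [pvSA, pvHA]
            rw [if_neg hij])]
      rw [pv_foldl_pair_sing])]
  rw [pv_foldl_pair]
  simp

theorem pv_B_eq (curr goal : List (List Int)) :
    block_moves_alt curr goal
      = ((List.range curr.length).flatMap (fun j => (List.range curr.length).map (fun i => pvSA curr j i)),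
         (List.range curr.length).flatMap (fun j => (List.range curr.length).map (fun i => pvHB curr goal j i))) := by
  simp only [block_moves_alt]
  rw [PySem.List.foldl_congr_mem (List.range curr.length) _
    (fun acc j => (acc.1 ++ (List.range curr.length).map (fun i => pvSA curr j i),
                   acc.2 ++ (List.range curr.length).map (fun i => pvHB curr goal j i))) ([], [])
    (by
      intro acc j hj
      dsimp only
      rw [PySem.List.foldl_congr_mem (List.range curr.length) _
        (fun acc2 i => (acc2.1 ++ [pvSA curr j i], acc2.2 ++ [pvHB curr goal j i])) acc
        (by
          intro acc2 i hi
          dsimp only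
          by_cases hij : i = j
          · rw [if_pos hij]
            simp only [pvSA, pvHB, PySem.List.slice_to_neg_one, pv_place_eq,
              PySem.List.pyGet?_neg_one]
            rw [if_pos hij, if_pos hij]
          · rw [if_neg hij]
            simp only [pvSA, pvHB, PySem.List.slice_to_neg_one, pv_place_eq,
              PySem.List.pyGet?_neg_one]
            rw [if_neg hij, if_neg hij]
            have hgd : (curr.set j (curr.getD j []).dropLast).getD i [] = curr.getD i [] := by
              rw [List.getD_eq_getElem?_getD, List.getElem?_set_ne (fun hh => hij hh.symm),
                ← List.getD_eq_getElem?_getD]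
            rw [hgd])]
      rw [pv_foldl_pair_sing])]
  rw [pv_foldl_pair]
  simp

theorem pv_getD_map_contrib (curr goal : List (List Int)) (j : Nat) (hj : j < curr.length) :
    (curr.map (fun s => pyContrib s goal)).getD j 0 = pyContrib (curr.getD j []) goal := by
  rw [List.getD_eq_getElem?_getD, List.getD_eq_getElem?_getD]
  simp [List.getElem?_eq_getElem hj]

theorem pv_HB_eq_HA (curr goal : List (List Int)) (j i : Nat) (hj : j < curr.length) (hi : i < curr.length) :
    pvHB curr goal j i = pvHA curr goal j i := by
  unfold pvHB pvHA pvSA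
  dsimp only
  simp only [PySem.List.slice_to_neg_one, PySem.List.pyGet?_neg_one, pv_place_eq,
    pv_getD_map_contrib curr goal j hj, pv_getD_map_contrib curr goal i hi]
  by_cases hij : i = j
  · rw [if_pos hij, if_pos hij, pv_calc_sum,
      pv_sum_filter _ _ (pv_filter_ne_arg goal), List.map_append, List.sum_append,
      pv_sum_map_set curr (fun s => pyContrib s goal) j ((curr.getD j []).dropLast) hj]
    simp [pv_contrib_single]
  · rw [if_neg hij, if_neg hij, pv_calc_sum, pv_sum_filter _ _ (pv_filter_ne_arg goal)]
    have hgd : (curr.set j (curr.getD j []).dropLast).getD i [] = curr.getD i [] := by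
      rw [List.getD_eq_getElem?_getD, List.getElem?_set_ne (fun hh => hij hh.symm),
        ← List.getD_eq_getElem?_getD]
    rw [hgd]
    rw [pv_sum_map_set (curr.set j (curr.getD j []).dropLast) (fun s => pyContrib s goal) i
      (curr.getD i [] ++ [(curr.getD j []).getLast?.getD 0]) (by simpa using hi)]
    rw [hgd]
    rw [pv_sum_map_set curr (fun s => pyContrib s goal) j ((curr.getD j []).dropLast) hj]
    ring

-- ===== VERDICT (by name: the statement is the Claim_ definition above) =====
theorem block_moves_spec : Claim_unchanged_block_moves := by
  intro curr_state goal _hdom _hpre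
  unfold Spec_block_moves
  intro hnd
  have hnodup : curr_state.Nodup := not_not.mp (by unfold D_block_moves at hnd; exact hnd)
  rw [pv_A_eq curr_state goal hnodup, pv_B_eq curr_state goal]
  refine Prod.ext rfl ?_
  dsimp only
  rw [List.flatMap_def, List.flatMap_def]
  refine congrArg List.flatten (List.map_congr_left ?_)
  intro j hj
  refine List.map_congr_left ?_
  intro i hi
  exact (pv_HB_eq_HA curr_state goal j i (List.mem_range.mp hj) (List.mem_range.mp hi)).symm

theorem block_moves_changed : Claim_changed_block_moves := by
  unfold Claim_changed_block_moves
  decide
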